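-- pv_equiv track=rewrite | github.com/pypi-data/pypi-mirror-392 | packages/calcflow/calcflow-0.3.0.tar.gz/calcflow-0.3.0/tests/io/orca/orca_builders/conftest.py | parse_orca_input
-- ===== SOURCE A (Python) =====
-- from typing import NamedTuple
--
-- class OrcaInputComponents(NamedTuple):
--     """Parsed components of an ORCA input file."""
--
--     keyword_line: str  # The "! SP RKS b3lyp ..." line
--     xyz_block: str  # Everything between "* xyz ..." and closing "*"
--     blocks: dict[str, str]  # %pal, %geom, %tddft, etc. blocks
--     raw_text: str  # Original input for fallback checks
--
-- def parse_orca_input(input_text: str) -> OrcaInputComponents: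
--     """
--     Parse ORCA input into structured components.
--
--     More robust than simple substring checks - extracts actual blocks
--     and normalizes whitespace for comparison.
--     """
--     lines = input_text.strip().split("\n")
--
--     # Extract keyword line (first line starting with !)
--     keyword_line = ""
--     for line in lines:
--         if line.strip().startswith("!"):
--             keyword_line = line.strip()
--             break
--
--     # Extract XYZ block
--     xyz_block = ""
--     in_xyz = False
--     xyz_lines = []
--     for line in lines:
--         if line.strip().startswith("* xyz"):
--             in_xyz = True
--             xyz_lines.append(line)
--         elif in_xyz:
--             xyz_lines.append(line)
--             if line.strip() == "*":
--                 break
--     xyz_block = "\n".join(xyz_lines)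
--
--     # Extract % blocks (e.g., %pal, %geom, %tddft, %cpcm)
--     blocks = {}
--     current_block = None
--     block_lines = []
--
--     for line in lines:
--         stripped = line.strip()
--         # Start of block
--         if stripped.startswith("%") and not stripped.startswith("%maxcore"):
--             # Handle %pal nprocs 4 end (single line)
--             if "end" in stripped:
--                 block_name = stripped.split()[0][1:]  # Remove %
--                 blocks[block_name] = stripped
--                 continue
--             # Multi-line block
--             current_block = stripped.split()[0][1:]  # Remove %
--             block_lines = [line]
--         elif current_block:
--             block_lines.append(line)
--             if stripped == "end":
--                 blocks[current_block] = "\n".join(block_lines)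
--                 current_block = None
--                 block_lines = []
--
--     return OrcaInputComponents(
--         keyword_line=keyword_line,
--         xyz_block=xyz_block,
--         blocks=blocks,
--         raw_text=input_text,
--     )
-- ===== SOURCE B (Python) =====
-- from typing import NamedTuple
--
--
-- class OrcaInputComponents(NamedTuple):
--     keyword_line: str
--     xyz_block: str
--     blocks: dict[str, str]
--     raw_text: str
--
--
-- def parse_orca_input(input_text: str) -> OrcaInputComponents:
--     """Single-pass parse: one loop over the lines maintains the keyword,
--     xyz and %-block state simultaneously."""
--     keyword_line = ""
--     have_keyword = False
--     xyz_lines = []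
--     xyz_state = 0  # 0 = not seen yet, 1 = inside block, 2 = closed
--     blocks = {}
--     current_block = ""  # "" means: not inside a multi-line block
--     block_lines = []
--
--     for line in input_text.strip().split("\n"):
--         stripped = line.strip()
--
--         # keyword line: only the first '!'-line counts
--         if not have_keyword and stripped.startswith("!"):
--             keyword_line = stripped
--             have_keyword = True
--
--         # xyz block: collection stops for good once the closing '*' is seen
--         if xyz_state != 2:
--             if stripped.startswith("* xyz"):
--                 xyz_state = 1
--                 xyz_lines.append(line)
--             elif xyz_state == 1:
--                 xyz_lines.append(line)
--                 if stripped == "*":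
--                     xyz_state = 2
--
--         # % blocks
--         if stripped.startswith("%") and not stripped.startswith("%maxcore"):
--             if "end" in stripped:
--                 blocks[stripped.split()[0][1:]] = stripped
--             else:
--                 current_block = stripped.split()[0][1:]
--                 block_lines = [line]
--         elif current_block:
--             block_lines.append(line)
--             if stripped == "end":
--                 blocks[current_block] = "\n".join(block_lines)
--                 current_block = ""
--                 block_lines = []
--
--     return OrcaInputComponents(
--         keyword_line=keyword_line,
--         xyz_block="\n".join(xyz_lines),
--         blocks=blocks,
--         raw_text=input_text,
--     )
-- ===== Notes on version B (the rewrite author's own statement) =====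
-- stated objective: alternative
-- what changed: A's three sequential scans over the line list (keyword line with break, xyz block with break, %-block accumulator) are fused into a single pass that maintains all three accumulators at once, with a found-flag and a closed-flag replacing the two early breaks.
import Mathlib
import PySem

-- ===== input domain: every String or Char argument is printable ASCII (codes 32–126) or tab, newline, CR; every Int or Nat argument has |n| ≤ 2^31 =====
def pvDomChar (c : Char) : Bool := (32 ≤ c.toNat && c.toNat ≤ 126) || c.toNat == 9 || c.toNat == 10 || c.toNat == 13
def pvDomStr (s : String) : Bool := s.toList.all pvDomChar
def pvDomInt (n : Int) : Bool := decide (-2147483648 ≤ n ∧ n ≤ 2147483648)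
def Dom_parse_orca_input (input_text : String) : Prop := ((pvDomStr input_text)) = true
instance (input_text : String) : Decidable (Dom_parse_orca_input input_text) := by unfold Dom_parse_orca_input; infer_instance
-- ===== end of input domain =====

-- B replaces A's three sequential scans over the lines by ONE loop that maintains the
-- keyword / xyz / %-block state simultaneously (objective: alternative decomposition, same cost).

-- ===== PORT A =====
-- stripped.split()[0][1:]  (used by both Pythons verbatim; split() is nonempty whenever this
-- is reached because stripped starts with '%')
def pvBlockName (stripped : String) : String :=
  PySem.Str.slice ((PySem.Str.split₀ stripped).headD "") (some 1) none

-- input_text.strip().split("\n"); the separator "\n" is nonempty, so split? is always `some`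
def pvLines (input_text : String) : List String :=
  (PySem.Str.split? (PySem.Str.strip input_text) "\n").getD []

-- A, loop 1: first line whose strip starts with "!" (then break)
def pvAKeyword : List String → String
  | [] => ""
  | line :: rest =>
    if PySem.Str.startswith (PySem.Str.strip line) "!" then PySem.Str.strip line
    else pvAKeyword rest

-- A, loop 2: collect the xyz block, break on the closing "*"
def pvAXyz : List String → Bool → List String → List String
  | [], _, xyz_lines => xyz_lines
  | line :: rest, in_xyz, xyz_lines =>
    if PySem.Str.startswith (PySem.Str.strip line) "* xyz" then
      pvAXyz rest true (xyz_lines ++ [line])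
    else if in_xyz then
      (if PySem.Str.strip line = "*" then xyz_lines ++ [line]
       else pvAXyz rest in_xyz (xyz_lines ++ [line]))
    else pvAXyz rest in_xyz xyz_lines

-- A, loop 3: %-blocks (current_block is a string; Python's `elif current_block:` is `≠ ""`)
def pvABlocks : List String → String → List String → PySem.Dict String String → PySem.Dict String String
  | [], _, _, blocks => blocks
  | line :: rest, current_block, block_lines, blocks =>
    let stripped := PySem.Str.strip line
    if PySem.Str.startswith stripped "%" = true ∧ ¬ PySem.Str.startswith stripped "%maxcore" = true then
      if PySem.Str.isIn "end" stripped = true then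
        pvABlocks rest current_block block_lines (blocks.insert (pvBlockName stripped) stripped)
      else
        pvABlocks rest (pvBlockName stripped) [line] blocks
    else if current_block ≠ "" then
      (if stripped = "end" then
        pvABlocks rest "" [] (blocks.insert current_block (PySem.Str.join "\n" (block_lines ++ [line])))
      else pvABlocks rest current_block (block_lines ++ [line]) blocks)
    else pvABlocks rest current_block block_lines blocks

def parse_orca_input (input_text : String) : String × String × (List (String × String)) × String :=
  let lines := pvLines input_text
  (pvAKeyword lines,
   PySem.Str.join "\n" (pvAXyz lines false []),
   (pvABlocks lines "" [] PySem.Dict.empty).items,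
   input_text)

-- ===== PORT B =====
-- per-line update of the keyword state (have_keyword, keyword_line)
def pvKwStep (s : Bool × String) (line : String) : Bool × String :=
  let stripped := PySem.Str.strip line
  if s.1 = false ∧ PySem.Str.startswith stripped "!" = true then (true, stripped) else s

-- per-line update of the xyz state (xyz_state 0/1/2, xyz_lines)
def pvXyzStep (s : Nat × List String) (line : String) : Nat × List String :=
  let stripped := PySem.Str.strip line
  if s.1 ≠ 2 then
    if PySem.Str.startswith stripped "* xyz" = true then (1, s.2 ++ [line])
    else if s.1 = 1 then
      (if stripped = "*" then (2, s.2 ++ [line]) else (1, s.2 ++ [line]))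
    else s
  else s

-- per-line update of the %-block state (current_block, block_lines, blocks)
def pvBlkStep (s : String × List String × PySem.Dict String String) (line : String) :
    String × List String × PySem.Dict String String :=
  let stripped := PySem.Str.strip line
  if PySem.Str.startswith stripped "%" = true ∧ ¬ PySem.Str.startswith stripped "%maxcore" = true then
    if PySem.Str.isIn "end" stripped = true then
      (s.1, s.2.1, s.2.2.insert (pvBlockName stripped) stripped)
    else (pvBlockName stripped, [line], s.2.2)
  else if s.1 ≠ "" then
    (if stripped = "end" then ("", [], s.2.2.insert s.1 (PySem.Str.join "\n" (s.2.1 ++ [line])))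
     else (s.1, s.2.1 ++ [line], s.2.2))
  else s

def parse_orca_input_alt (input_text : String) : String × String × (List (String × String)) × String :=
  let lines := pvLines input_text
  let final := lines.foldl
    (fun s line => (pvKwStep s.1 line, pvXyzStep s.2.1 line, pvBlkStep s.2.2 line))
    ((false, ""), (0, []), ("", [], PySem.Dict.empty))
  (final.1.2, PySem.Str.join "\n" final.2.1.2, final.2.2.2.2.items, input_text)

-- ===== PRECONDITION & SPEC =====
def Spec_parse_orca_input (input_text : String) (out : String × String × (List (String × String)) × String) : Prop := out = parse_orca_input_alt input_text
instance (input_text : String) (out : String × String × (List (String × String)) × String) : Decidable (Spec_parse_orca_input input_text out) := by unfold Spec_parse_orca_input; infer_instance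

-- ===== CLAIM (what is proved, stated in full; the proofs are below) =====
def Claim_equal_parse_orca_input : Prop := ∀ (input_text : String), Dom_parse_orca_input input_text → Spec_parse_orca_input input_text (parse_orca_input input_text)

-- ===== LEMMAS AND PROOFS =====
theorem pvKw_done (lines : List String) (k : String) :
    lines.foldl pvKwStep (true, k) = (true, k) := by
  induction lines with
  | nil => rfl
  | cons line rest ih => simp [List.foldl_cons, pvKwStep, ih]

theorem pvKw_eq (lines : List String) :
    (lines.foldl pvKwStep (false, "")).2 = pvAKeyword lines := by
  induction lines with
  | nil => rfl
  | cons line rest ih =>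
    by_cases h : PySem.Chars.startswith (PySem.Chars.strip line.toList) ['!'] = true
    · simp [List.foldl_cons, pvKwStep, pvAKeyword, h, pvKw_done]
    · simp [List.foldl_cons, pvKwStep, pvAKeyword, h, ih]

theorem pvXyz_done (lines : List String) (acc : List String) :
    lines.foldl pvXyzStep (2, acc) = (2, acc) := by
  induction lines with
  | nil => rfl
  | cons line rest ih => simp [List.foldl_cons, pvXyzStep, ih]

theorem pvXyz_eq (lines : List String) : ∀ acc : List String,
    (lines.foldl pvXyzStep (0, acc)).2 = pvAXyz lines false acc ∧
    (lines.foldl pvXyzStep (1, acc)).2 = pvAXyz lines true acc := by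
  induction lines with
  | nil => intro acc; exact ⟨rfl, rfl⟩
  | cons line rest ih =>
    intro acc
    by_cases h1 : PySem.Chars.startswith (PySem.Chars.strip line.toList) ['*', ' ', 'x', 'y', 'z'] = true
    · simp [List.foldl_cons, pvXyzStep, pvAXyz, h1, (ih (acc ++ [line])).2]
    · by_cases h2 : PySem.Str.strip line = "*"
      · have hc : PySem.Chars.strip line.toList = ['*'] := by
          rw [← PySem.Str.toList_strip, h2]; rfl
        have hsw : PySem.Chars.startswith ['*'] ['*', ' ', 'x', 'y', 'z'] = false := by decide
        simp [List.foldl_cons, pvXyzStep, pvAXyz, h2, hsw, (ih acc).1, pvXyz_done]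
      · simp [List.foldl_cons, pvXyzStep, pvAXyz, h1, h2, (ih acc).1, (ih (acc ++ [line])).2]

theorem pvBlk_eq (lines : List String) :
    ∀ (cur : String) (bls : List String) (blocks : PySem.Dict String String),
    (lines.foldl pvBlkStep (cur, bls, blocks)).2.2 = pvABlocks lines cur bls blocks := by
  induction lines with
  | nil => intro cur bls blocks; rfl
  | cons line rest ih =>
    intro cur bls blocks
    by_cases h1 : PySem.Chars.startswith (PySem.Chars.strip line.toList) ['%'] = true ∧
        PySem.Chars.startswith (PySem.Chars.strip line.toList) ['%', 'm', 'a', 'x', 'c', 'o', 'r', 'e'] = false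
    · by_cases h2 : PySem.Chars.isIn ['e', 'n', 'd'] (PySem.Chars.strip line.toList) = true
      · simp [List.foldl_cons, pvBlkStep, pvABlocks, h1, h2, ih]
      · simp [List.foldl_cons, pvBlkStep, pvABlocks, h1, h2, ih]
    · by_cases h3 : cur = ""
      · simp [List.foldl_cons, pvBlkStep, pvABlocks, h1, h3, ih]
      · by_cases h4 : PySem.Str.strip line = "end"
        · have hc : PySem.Chars.strip line.toList = ['e', 'n', 'd'] := by
            rw [← PySem.Str.toList_strip, h4]; rfl
          have hsw : PySem.Chars.startswith ['e', 'n', 'd'] ['%'] = false := by decide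
          simp [List.foldl_cons, pvBlkStep, pvABlocks, h3, h4, hsw, ih]
        · simp [List.foldl_cons, pvBlkStep, pvABlocks, h1, h3, h4, ih]

-- ===== VERDICT (by name: the statement is the Claim_ definition above) =====
theorem parse_orca_input_spec : Claim_equal_parse_orca_input := by
  intro input_text _
  unfold Spec_parse_orca_input
  simp only [parse_orca_input, parse_orca_input_alt]
  rw [PySem.List.foldl_prod_mk (f := pvKwStep)
        (g := fun t line => (pvXyzStep t.1 line, pvBlkStep t.2 line)),
      PySem.List.foldl_prod_mk (f := pvXyzStep) (g := pvBlkStep)]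
  rw [pvKw_eq, pvBlk_eq, (pvXyz_eq (pvLines input_text) []).1]
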